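-- pv_equiv track=rewrite | github.com/Tanych/launchpad | lp/ui/sort.py | elecsort
-- ===== SOURCE A (Python) =====
-- def _is_electronic(holding):
--     try:
--         if holding['ELECTRONIC_DATA']['LINK856U']:
--             return True
--         return False
--     except KeyError:
--         return False
--
-- def elecsort(holdings_list, rev=False):
--     elec, rest = [],[]
--     for holding in holdings_list:
--         if _is_electronic(holding):
--             elec.append(holding)
--         else:
--             rest.append(holding)
--     if not rev:
--         return elec + rest
--     return rest + elec
-- ===== SOURCE B (Python) =====
-- def _is_electronic(holding):
--     try:
--         if holding['ELECTRONIC_DATA']['LINK856U']: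
--             return True
--         return False
--     except KeyError:
--         return False
--
-- def elecsort(holdings_list, rev=False):
--     # stable sort by boolean key: for rev=False electronic items (key False) come
--     # first; for rev=True they come last; stability keeps original order in groups
--     return sorted(holdings_list, key=lambda h: _is_electronic(h) == rev)
-- ===== Notes on version B (the rewrite author's own statement) =====
-- stated objective: idiomatic
-- what changed: Replaced the manual two-list partition-and-concatenate loop with a single stable sorted() call keyed by (_is_electronic(h) == rev), whose stability reproduces the group order exactly.
import Mathlib
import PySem

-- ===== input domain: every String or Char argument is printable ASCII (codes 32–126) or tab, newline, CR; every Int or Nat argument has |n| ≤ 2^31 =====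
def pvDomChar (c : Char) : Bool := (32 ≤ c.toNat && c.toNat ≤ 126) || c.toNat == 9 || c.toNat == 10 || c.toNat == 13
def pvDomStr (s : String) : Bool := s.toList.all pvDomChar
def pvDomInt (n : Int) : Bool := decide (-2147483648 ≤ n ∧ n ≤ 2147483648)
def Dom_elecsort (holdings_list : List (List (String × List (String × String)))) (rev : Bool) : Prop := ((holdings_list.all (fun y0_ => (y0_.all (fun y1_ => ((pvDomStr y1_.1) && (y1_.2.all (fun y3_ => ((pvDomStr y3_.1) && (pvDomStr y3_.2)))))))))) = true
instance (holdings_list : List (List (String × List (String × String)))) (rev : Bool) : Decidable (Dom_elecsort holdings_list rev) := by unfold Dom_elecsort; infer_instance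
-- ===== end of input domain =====

-- B replaces A's two-accumulator partition loop by one stable sorted() call keyed by
-- (_is_electronic(h) == rev); same return value, idiomatic one-liner.

-- ===== PORT A =====
-- _is_electronic: dict lookups are first-match on the association list; a missing key
-- is the caught KeyError branch; the truthiness test on the string is "non-empty".
def isElectronic (holding : List (String × List (String × String))) : Bool :=
  match holding.lookup "ELECTRONIC_DATA" with
  | none => false
  | some d =>
    match d.lookup "LINK856U" with
    | none => false
    | some s => !s.toList.isEmpty

def elecsort (holdings_list : List (List (String × List (String × String)))) (rev : Bool) : List (List (String × List (String × String))) :=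
  let er := holdings_list.foldl
    (fun (p : List (List (String × List (String × String))) × List (List (String × List (String × String)))) holding =>
      if isElectronic holding then (p.1 ++ [holding], p.2) else (p.1, p.2 ++ [holding]))
    ([], [])
  if !rev then er.1 ++ er.2 else er.2 ++ er.1

-- ===== PORT B =====
-- B keeps _is_electronic unchanged (same helper isElectronic above).
def elecsort_alt (holdings_list : List (List (String × List (String × String)))) (rev : Bool) : List (List (String × List (String × String))) :=
  PySem.List.sorted holdings_list (fun h => isElectronic h == rev)

-- ===== PRECONDITION & SPEC =====
def Spec_elecsort (holdings_list : List (List (String × List (String × String)))) (rev : Bool) (out : List (List (String × List (String × String)))) : Prop := out = elecsort_alt holdings_list rev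
instance (holdings_list : List (List (String × List (String × String)))) (rev : Bool) (out : List (List (String × List (String × String)))) : Decidable (Spec_elecsort holdings_list rev out) := by unfold Spec_elecsort; infer_instance

-- ===== CLAIM (what is proved, stated in full; the proofs are below) =====
def Claim_equal_elecsort : Prop := ∀ (holdings_list : List (List (String × List (String × String)))) (rev : Bool), Dom_elecsort holdings_list rev → Spec_elecsort holdings_list rev (elecsort holdings_list rev)

-- ===== LEMMAS AND PROOFS =====

-- Inserting x into a list split as "all-false keys ++ all-true keys": x with a true
-- key goes to the very end, x with a false key goes between the two groups.
theorem insertBy_bool_shape {α : Type} (k : α → Bool) (x : α) (A B : List α)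
    (hA : ∀ a ∈ A, k a = false) (hB : ∀ b ∈ B, k b = true) :
    PySem.List.insertBy (fun a b => decide (k a < k b)) x (A ++ B) =
      if k x then A ++ B ++ [x] else A ++ x :: B := by
  induction A with
  | nil =>
    simp only [List.nil_append]
    induction B with
    | nil => cases hx : k x <;> simp [PySem.List.insertBy]
    | cons b B ih =>
      have hb : k b = true := hB b (List.mem_cons_self ..)
      cases hx : k x with
      | false => simp [PySem.List.insertBy, hx, hb]
      | true =>
        have := ih (fun y hy => hB y (List.mem_cons_of_mem _ hy))
        simp [PySem.List.insertBy, hx, hb] at this ⊢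
        simpa [hx] using this
  | cons a A ih =>
    have ha : k a = false := hA a (List.mem_cons_self ..)
    have := ih (fun y hy => hA y (List.mem_cons_of_mem _ hy))
    cases hx : k x <;>
      simp_all [PySem.List.insertBy]

-- The insertion-sort fold over a boolean key, started from such a split accumulator,
-- appends the false-keyed elements to the first group and the true-keyed to the second.
theorem foldl_insertBy_bool {α : Type} (k : α → Bool) (xs : List α) (A B : List α)
    (hA : ∀ a ∈ A, k a = false) (hB : ∀ b ∈ B, k b = true) :
    xs.foldl (fun acc x => PySem.List.insertBy (fun a b => decide (k a < k b)) x acc) (A ++ B)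
      = (A ++ xs.filter (fun x => !k x)) ++ (B ++ xs.filter k) := by
  induction xs generalizing A B with
  | nil => simp
  | cons x xs ih =>
    simp only [List.foldl_cons]
    rw [insertBy_bool_shape k x A B hA hB]
    cases hx : k x with
    | false =>
      have hA' : ∀ a ∈ A ++ [x], k a = false := by
        intro a ha
        rcases List.mem_append.1 ha with h | h
        · exact hA a h
        · simpa [List.mem_singleton.1 h] using hx
      rw [if_neg (by simp), show A ++ x :: B = (A ++ [x]) ++ B by simp,
        ih (A ++ [x]) B hA' hB]
      simp [hx]
    | true =>
      have hB' : ∀ b ∈ B ++ [x], k b = true := by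
        intro b hb
        rcases List.mem_append.1 hb with h | h
        · exact hB b h
        · simpa [List.mem_singleton.1 h] using hx
      rw [if_pos (by simp), show A ++ B ++ [x] = A ++ (B ++ [x]) by simp,
        ih A (B ++ [x]) hA hB']
      simp [hx]

-- A stable sort by a boolean key is exactly "false-keyed elements, then true-keyed", in order.
theorem sorted_bool_key {α : Type} (k : α → Bool) (xs : List α) :
    PySem.List.sorted xs k false = xs.filter (fun x => !k x) ++ xs.filter k := by
  show xs.foldl (fun acc x => PySem.List.insertBy (fun a b => decide (k a < k b)) x acc) [] = _
  have := foldl_insertBy_bool k xs [] [] (by simp) (by simp)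
  simpa using this

-- A's partition fold, from a general accumulator, is filter/filter-not appended.
theorem elecsort_foldl (xs : List (List (String × List (String × String))))
    (E R : List (List (String × List (String × String)))) :
    xs.foldl
      (fun (p : List (List (String × List (String × String))) × List (List (String × List (String × String)))) holding =>
        if isElectronic holding then (p.1 ++ [holding], p.2) else (p.1, p.2 ++ [holding]))
      (E, R)
      = (E ++ xs.filter isElectronic, R ++ xs.filter (fun h => !isElectronic h)) := by
  induction xs generalizing E R with
  | nil => simp
  | cons x xs ih =>
    simp only [List.foldl_cons]
    cases hx : isElectronic x <;>
      simp [hx, ih]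

-- ===== VERDICT (by name: the statement is the Claim_ definition above) =====
theorem elecsort_spec : Claim_equal_elecsort := by
  intro xs rev _
  show elecsort xs rev = elecsort_alt xs rev
  unfold elecsort elecsort_alt
  rw [show (([], []) : List (List (String × List (String × String))) × List (List (String × List (String × String)))) = ([] ++ [], [] ++ []) by simp]
  rw [elecsort_foldl, sorted_bool_key]
  cases rev with
  | false =>
    simp only [Bool.not_false, if_pos]
    congr 1 <;> (apply List.filter_congr; intro h _; cases isElectronic h <;> rfl)
  | true =>
    simp only [Bool.not_true, Bool.false_eq_true, if_false]
    congr 1 <;> (apply List.filter_congr; intro h _; cases isElectronic h <;> rfl)
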